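-- pv_equiv track=rewrite | github.com/pypi-data/pypi-mirror-376 | packages/stringplus/stringplus-0.1.1-py3-none-any.whl/stringx/core.py | _charset_from_spec
-- ===== SOURCE A (Python) =====
-- from string import ascii_letters, digits, hexdigits, ascii_lowercase, ascii_uppercase, punctuation, printable, whitespace
--
-- def _charset_from_spec(spec) -> str:
--     if isinstance(spec, str):
--         tokens = [t.strip() for t in spec.split("+")]
--         bank = ""
--         for t in tokens:
--             if t in {"letters", "alpha"}:
--                 bank += ascii_letters
--             elif t in {"lower", "lowercase"}:
--                 bank += ascii_lowercase
--             elif t in {"upper", "uppercase"}: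
--                 bank += ascii_uppercase
--             elif t in {"digits", "nums", "numbers"}:
--                 bank += digits
--             elif t in {"hex"}:
--                 bank += hexdigits
--             elif t in {"punct", "punctuation"}:
--                 bank += punctuation
--             elif t in {"printable"}:
--                 bank += printable
--             elif t in {"whitespace", "space"}:
--                 bank += whitespace
--         return "".join(sorted(set(bank)))
--     try:
--         return "".join(spec)
--     except TypeError:
--         raise TypeError("Unsupported charset spec")
-- ===== SOURCE B (Python) =====
-- from string import ascii_letters, digits, hexdigits, ascii_lowercase, ascii_uppercase, punctuation, printable, whitespace
--
-- _CLASSES = [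
--     (("letters", "alpha"), ascii_letters),
--     (("lower", "lowercase"), ascii_lowercase),
--     (("upper", "uppercase"), ascii_uppercase),
--     (("digits", "nums", "numbers"), digits),
--     (("hex",), hexdigits),
--     (("punct", "punctuation"), punctuation),
--     (("printable",), printable),
--     (("whitespace", "space"), whitespace),
-- ]
--
-- _UNIVERSE = sorted(set(printable))  # every char any spec can produce, already sorted & distinct
--
-- def _charset_from_spec(spec) -> str:
--     if isinstance(spec, str):
--         toks = [t.strip() for t in spec.split("+")]
--         wanted = [cs for aliases, cs in _CLASSES if any(t in aliases for t in toks)]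
--         return "".join(c for c in _UNIVERSE if any(c in cs for cs in wanted))
--     try:
--         return "".join(spec)
--     except TypeError:
--         raise TypeError("Unsupported charset spec")
-- ===== Notes on version B (the rewrite author's own statement) =====
-- stated objective: alternative
-- what changed: Instead of concatenating the selected class strings and then sorting/deduplicating the bank, B collects which classes the tokens request and makes a single filtering pass over the fixed sorted universe of printable characters, keeping each character that belongs to a requested class (no sort, no dedup of a variable-size bank).
import Mathlib
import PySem

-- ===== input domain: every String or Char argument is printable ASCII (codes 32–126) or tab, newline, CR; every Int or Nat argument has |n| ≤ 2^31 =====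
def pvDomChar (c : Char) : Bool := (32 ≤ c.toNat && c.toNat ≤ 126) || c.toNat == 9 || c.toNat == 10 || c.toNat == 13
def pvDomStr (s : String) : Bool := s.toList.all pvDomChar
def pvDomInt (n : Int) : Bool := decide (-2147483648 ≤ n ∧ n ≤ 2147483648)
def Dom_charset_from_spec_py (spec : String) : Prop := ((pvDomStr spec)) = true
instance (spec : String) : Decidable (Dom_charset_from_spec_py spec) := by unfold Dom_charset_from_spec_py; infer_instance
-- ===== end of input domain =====

-- B: instead of concatenating selected class strings and sorting/deduplicating the bank,
-- collect the requested classes and filter the fixed sorted universe of printable characters once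
-- (alternative algorithm; for a String argument the non-str fallback of the Python is unreachable).

-- string-module constants, shared context of both Pythons
def pyLower : List Char := "abcdefghijklmnopqrstuvwxyz".toList
def pyUpper : List Char := "ABCDEFGHIJKLMNOPQRSTUVWXYZ".toList
def pyLetters : List Char := pyLower ++ pyUpper
def pyDigits : List Char := "0123456789".toList
def pyHexdigits : List Char := "0123456789abcdefABCDEF".toList
def pyPunctuation : List Char := "!\"#$%&'()*+,-./:;<=>?@[\\]^_`{|}~".toList
def pyWhitespace : List Char := " \t\n\r\x0b\x0c".toList
def pyPrintable : List Char := pyDigits ++ pyLetters ++ pyPunctuation ++ pyWhitespace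

-- ===== PORT A =====
def charset_from_spec_py (spec : String) : String :=
  let tokens := (PySem.Chars.splitOn spec.toList "+".toList).map PySem.Chars.strip
  let bank := tokens.foldl (fun bank t =>
    if t = "letters".toList ∨ t = "alpha".toList then bank ++ pyLetters
    else if t = "lower".toList ∨ t = "lowercase".toList then bank ++ pyLower
    else if t = "upper".toList ∨ t = "uppercase".toList then bank ++ pyUpper
    else if t = "digits".toList ∨ t = "nums".toList ∨ t = "numbers".toList then bank ++ pyDigits
    else if t = "hex".toList then bank ++ pyHexdigits
    else if t = "punct".toList ∨ t = "punctuation".toList then bank ++ pyPunctuation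
    else if t = "printable".toList then bank ++ pyPrintable
    else if t = "whitespace".toList ∨ t = "space".toList then bank ++ pyWhitespace
    else bank) []
  String.ofList (PySem.List.sorted (PySem.Set.ofList bank) (fun c => c) false)

-- ===== PORT B =====
-- _CLASSES: alias groups paired with their charset constants
def pvClasses : List (List (List Char) × List Char) :=
  [(["letters".toList, "alpha".toList], pyLetters),
   (["lower".toList, "lowercase".toList], pyLower),
   (["upper".toList, "uppercase".toList], pyUpper),
   (["digits".toList, "nums".toList, "numbers".toList], pyDigits),
   (["hex".toList], pyHexdigits),
   (["punct".toList, "punctuation".toList], pyPunctuation),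
   (["printable".toList], pyPrintable),
   (["whitespace".toList, "space".toList], pyWhitespace)]

-- _UNIVERSE = sorted(set(printable))
def pvUniverse : List Char := PySem.List.sorted (PySem.Set.ofList pyPrintable) (fun c => c) false

def charset_from_spec_py_alt (spec : String) : String :=
  let toks := (PySem.Chars.splitOn spec.toList "+".toList).map PySem.Chars.strip
  let wanted := (pvClasses.filter (fun p => toks.any (fun t => p.1.contains t))).map Prod.snd
  String.ofList (pvUniverse.filter (fun c => wanted.any (fun cs => cs.contains c)))

-- ===== PRECONDITION & SPEC =====
def Spec_charset_from_spec_py (spec : String) (out : String) : Prop := out = charset_from_spec_py_alt spec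
instance (spec : String) (out : String) : Decidable (Spec_charset_from_spec_py spec out) := by unfold Spec_charset_from_spec_py; infer_instance

-- ===== CLAIM (what is proved, stated in full; the proofs are below) =====
def Claim_equal_charset_from_spec_py : Prop := ∀ (spec : String), Dom_charset_from_spec_py spec → Spec_charset_from_spec_py spec (charset_from_spec_py spec)

-- ===== LEMMAS AND PROOFS =====

-- A's per-token contribution, as a function (the if/elif chain of the loop body)
def classA (t : List Char) : List Char :=
  if t = "letters".toList ∨ t = "alpha".toList then pyLetters
  else if t = "lower".toList ∨ t = "lowercase".toList then pyLower
  else if t = "upper".toList ∨ t = "uppercase".toList then pyUpper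
  else if t = "digits".toList ∨ t = "nums".toList ∨ t = "numbers".toList then pyDigits
  else if t = "hex".toList then pyHexdigits
  else if t = "punct".toList ∨ t = "punctuation".toList then pyPunctuation
  else if t = "printable".toList then pyPrintable
  else if t = "whitespace".toList ∨ t = "space".toList then pyWhitespace
  else []

-- A's accumulator loop flattens the per-token contributions
theorem foldA_eq (ts : List (List Char)) (init : List Char) :
    (ts.foldl (fun bank t =>
      if t = "letters".toList ∨ t = "alpha".toList then bank ++ pyLetters
      else if t = "lower".toList ∨ t = "lowercase".toList then bank ++ pyLower
      else if t = "upper".toList ∨ t = "uppercase".toList then bank ++ pyUpper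
      else if t = "digits".toList ∨ t = "nums".toList ∨ t = "numbers".toList then bank ++ pyDigits
      else if t = "hex".toList then bank ++ pyHexdigits
      else if t = "punct".toList ∨ t = "punctuation".toList then bank ++ pyPunctuation
      else if t = "printable".toList then bank ++ pyPrintable
      else if t = "whitespace".toList ∨ t = "space".toList then bank ++ pyWhitespace
      else bank) init)
    = init ++ (ts.map classA).flatten := by
  induction ts generalizing init with
  | nil => simp
  | cons t ts ih =>
    have hstep : (if t = "letters".toList ∨ t = "alpha".toList then init ++ pyLetters
      else if t = "lower".toList ∨ t = "lowercase".toList then init ++ pyLower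
      else if t = "upper".toList ∨ t = "uppercase".toList then init ++ pyUpper
      else if t = "digits".toList ∨ t = "nums".toList ∨ t = "numbers".toList then init ++ pyDigits
      else if t = "hex".toList then init ++ pyHexdigits
      else if t = "punct".toList ∨ t = "punctuation".toList then init ++ pyPunctuation
      else if t = "printable".toList then init ++ pyPrintable
      else if t = "whitespace".toList ∨ t = "space".toList then init ++ pyWhitespace
      else init) = init ++ classA t := by
      unfold classA; split_ifs <;> simp
    simp only [List.foldl_cons, hstep, ih, List.map_cons, List.flatten_cons, List.append_assoc]

-- every class charset lies inside printable (a Boolean fact the kernel checks by evaluation)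
theorem class_subset_printable_bool :
    (pvClasses.all (fun p => p.2.all (fun c => pyPrintable.contains c))) = true := rfl

-- hence every class charset lies inside the universe
theorem class_subset_universe : ∀ p ∈ pvClasses, ∀ c ∈ p.2, c ∈ pvUniverse := by
  have h := class_subset_printable_bool
  simp only [List.all_eq_true, List.contains_iff_mem] at h
  intro p hp c hc
  rw [pvUniverse, PySem.List.mem_sorted, PySem.Set.mem_ofList]
  exact h p hp c hc

-- membership in A's bank ↔ some requested class contains c
theorem mem_bank_iff (ts : List (List Char)) (c : Char) :
    c ∈ (ts.map classA).flatten ↔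
      ∃ p ∈ pvClasses, (ts.any (fun t => p.1.contains t)) = true ∧ c ∈ p.2 := by
  simp only [List.mem_flatten, List.mem_map, List.any_eq_true, List.contains_iff_mem]
  constructor
  · rintro ⟨l, ⟨t, ht, rfl⟩, hc⟩
    unfold classA at hc
    split_ifs at hc with h1 h2 h3 h4 h5 h6 h7 h8
    · exact ⟨(["letters".toList, "alpha".toList], pyLetters), by simp [pvClasses],
        ⟨t, ht, by rcases h1 with h|h <;> subst h <;> simp⟩, hc⟩
    · exact ⟨(["lower".toList, "lowercase".toList], pyLower), by simp [pvClasses],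
        ⟨t, ht, by rcases h2 with h|h <;> subst h <;> simp⟩, hc⟩
    · exact ⟨(["upper".toList, "uppercase".toList], pyUpper), by simp [pvClasses],
        ⟨t, ht, by rcases h3 with h|h <;> subst h <;> simp⟩, hc⟩
    · exact ⟨(["digits".toList, "nums".toList, "numbers".toList], pyDigits), by simp [pvClasses],
        ⟨t, ht, by rcases h4 with h|h|h <;> subst h <;> simp⟩, hc⟩
    · exact ⟨(["hex".toList], pyHexdigits), by simp [pvClasses],
        ⟨t, ht, by subst h5; simp⟩, hc⟩
    · exact ⟨(["punct".toList, "punctuation".toList], pyPunctuation), by simp [pvClasses],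
        ⟨t, ht, by rcases h6 with h|h <;> subst h <;> simp⟩, hc⟩
    · exact ⟨(["printable".toList], pyPrintable), by simp [pvClasses],
        ⟨t, ht, by subst h7; simp⟩, hc⟩
    · exact ⟨(["whitespace".toList, "space".toList], pyWhitespace), by simp [pvClasses],
        ⟨t, ht, by rcases h8 with h|h <;> subst h <;> simp⟩, hc⟩
    · simp at hc
  · rintro ⟨p, hp, ⟨t, ht, hal⟩, hc⟩
    refine ⟨classA t, ⟨t, ht, rfl⟩, ?_⟩
    fin_cases hp <;> simp at hal <;>
      (try rcases hal with hal | hal | hal) <;> (try subst hal) <;> exact hc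

-- the universe is strictly increasing
theorem universe_pairwise : pvUniverse.Pairwise (· < ·) :=
  PySem.List.sorted_ofList_pairwise_lt pyPrintable

-- ===== VERDICT (by name: the statement is the Claim_ definition above) =====
set_option maxRecDepth 4000 in
theorem charset_from_spec_py_spec : Claim_equal_charset_from_spec_py := by
  intro spec _
  unfold Spec_charset_from_spec_py charset_from_spec_py charset_from_spec_py_alt
  dsimp only
  rw [foldA_eq]
  simp only [List.nil_append]
  set ts := (PySem.Chars.splitOn spec.toList "+".toList).map PySem.Chars.strip with hts
  congr 1
  set l1 := PySem.List.sorted (PySem.Set.ofList ((ts.map classA).flatten)) (fun c => c) false with hl1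
  set l2 := pvUniverse.filter
    (fun c => ((pvClasses.filter (fun p => ts.any (fun t => p.1.contains t))).map Prod.snd).any
      (fun cs => cs.contains c)) with hl2
  have h1lt : l1.Pairwise (· < ·) := PySem.List.sorted_ofList_pairwise_lt _
  have h2lt : l2.Pairwise (· < ·) := universe_pairwise.filter _
  have hmem : ∀ c, c ∈ l1 ↔ c ∈ l2 := by
    intro c
    rw [hl1, hl2, PySem.List.mem_sorted, PySem.Set.mem_ofList, mem_bank_iff,
      List.mem_filter]
    simp only [List.any_eq_true, List.mem_map, List.mem_filter, List.contains_iff_mem]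
    constructor
    · rintro ⟨p, hp, hflag, hc⟩
      exact ⟨class_subset_universe p hp c hc,
        ⟨p.2, ⟨p, ⟨hp, by simpa using hflag⟩, rfl⟩, hc⟩⟩
    · rintro ⟨-, cs, ⟨p, ⟨hp, hflag⟩, rfl⟩, hc⟩
      exact ⟨p, hp, by simpa using hflag, hc⟩
  have hnd1 : l1.Nodup := h1lt.imp ne_of_lt
  have hnd2 : l2.Nodup := h2lt.imp ne_of_lt
  have hperm : l1.Perm l2 := by
    rw [List.perm_ext_iff_of_nodup hnd1 hnd2]
    exact hmem
  exact List.Perm.eq_of_pairwise (fun a b _ _ h h' => le_antisymm h h')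
    (h1lt.imp le_of_lt) (h2lt.imp le_of_lt) hperm
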